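-- pv_equiv track=rewrite | github.com/batish52/codecontext | codecontext/usage_ledger.py | _request_class
-- ===== SOURCE A (Python) =====
-- def _request_class(goal: str, intent: str | None = None) -> str:
--     text = (goal or "").lower()
--     intent = (intent or "").lower()
--     if ("exact" in text and any(w in text for w in ("function", "class", "method", "body"))) or "exact-body" in text:
--         return "exact_body"
--     if intent == "runtime_diagnostics" or "fallback" in text or "plugin working" in text:
--         return "runtime_diagnostics"
--     if any(w in text for w in ("config", "setting", "manifest", "package.json", "requirements", ".env")):
--         return "config_manifest_lookup"
--     if any(w in text for w in ("project tree", "repo structure", "layout", "folders", "directories")):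
--         return "repo_navigation"
--     if intent == "code_edit" or any(w in text for w in ("edit", "change", "update", "modify", "rewrite", "refactor", "fix")):
--         return "simple_edit_intent"
--     if intent == "bug_hunt" or any(w in text for w in ("error", "exception", "traceback", "failure", "broken")):
--         return "log_error_triage"
--     if any(w in text for w in ("explain", "why", "architecture", "overview")):
--         return "explain_style"
--     return "other"
-- ===== SOURCE B (Python) =====
-- RULE_WORDS = (
--     ("fallback", "plugin working"),
--     ("config", "setting", "manifest", "package.json", "requirements", ".env"),
--     ("project tree", "repo structure", "layout", "folders", "directories"),
--     ("edit", "change", "update", "modify", "rewrite", "refactor", "fix"),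
--     ("error", "exception", "traceback", "failure", "broken"),
--     ("explain", "why", "architecture", "overview"),
-- )
-- LABELS = ("runtime_diagnostics", "config_manifest_lookup", "repo_navigation",
--           "simple_edit_intent", "log_error_triage", "explain_style", "other")
-- INTENT_PRIORITY = {"runtime_diagnostics": 0, "code_edit": 3, "bug_hunt": 4}
--
--
-- def _request_class(goal: str, intent: str | None = None) -> str:
--     text = (goal or "").lower()
--     if ("exact" in text and any(w in text for w in ("function", "class", "method", "body"))) or "exact-body" in text:
--         return "exact_body"
--     # the intent, if recognised, caps the priority; every keyword category is
--     # scored and the best (lowest) priority wins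
--     best = INTENT_PRIORITY.get((intent or "").lower(), len(RULE_WORDS))
--     for prio, words in enumerate(RULE_WORDS):
--         if prio < best and any(w in text for w in words):
--             best = prio
--     return LABELS[best]
-- ===== Notes on version B (the rewrite author's own statement) =====
-- stated objective: alternative
-- what changed: After the exact-body check, B replaces A's ordered early-return if-chain with a scoring pass: an intent->priority dict gives an initial priority cap, a single loop over a flat keyword-category table takes the minimum priority of all matching categories, and the label is picked from a priority-indexed label list.
import Mathlib
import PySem

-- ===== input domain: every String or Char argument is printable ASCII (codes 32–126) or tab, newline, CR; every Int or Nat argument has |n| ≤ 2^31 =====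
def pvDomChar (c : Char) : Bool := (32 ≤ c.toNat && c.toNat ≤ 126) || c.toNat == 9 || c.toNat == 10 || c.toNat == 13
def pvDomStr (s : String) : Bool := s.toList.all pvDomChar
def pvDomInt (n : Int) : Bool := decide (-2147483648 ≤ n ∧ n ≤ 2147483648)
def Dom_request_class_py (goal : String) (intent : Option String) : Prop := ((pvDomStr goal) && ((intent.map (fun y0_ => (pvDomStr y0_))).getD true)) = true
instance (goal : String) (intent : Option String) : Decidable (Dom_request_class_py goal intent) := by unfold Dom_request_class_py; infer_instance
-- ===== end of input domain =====

-- B replaces A's early-return if-chain by a scoring pass: intent maps to a priority cap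
-- and one loop over a keyword table takes the minimum matching priority (alternative; same cost).

-- ===== PORT A =====
def request_class_py (goal : String) (intent : Option String) : String :=
  let text := PySem.Str.lower goal
  let intent' := PySem.Str.lower (intent.getD "")
  if (PySem.Str.isIn "exact" text &&
      (["function", "class", "method", "body"].any (fun w => PySem.Str.isIn w text))) ||
     PySem.Str.isIn "exact-body" text then "exact_body"
  else if intent' == "runtime_diagnostics" || PySem.Str.isIn "fallback" text ||
          PySem.Str.isIn "plugin working" text then "runtime_diagnostics"
  else if ["config", "setting", "manifest", "package.json", "requirements", ".env"].any
          (fun w => PySem.Str.isIn w text) then "config_manifest_lookup"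
  else if ["project tree", "repo structure", "layout", "folders", "directories"].any
          (fun w => PySem.Str.isIn w text) then "repo_navigation"
  else if intent' == "code_edit" ||
          ["edit", "change", "update", "modify", "rewrite", "refactor", "fix"].any
          (fun w => PySem.Str.isIn w text) then "simple_edit_intent"
  else if intent' == "bug_hunt" ||
          ["error", "exception", "traceback", "failure", "broken"].any
          (fun w => PySem.Str.isIn w text) then "log_error_triage"
  else if ["explain", "why", "architecture", "overview"].any
          (fun w => PySem.Str.isIn w text) then "explain_style"
  else "other"

-- ===== PORT B =====
def rcRuleWords : List (List String) :=
  [ ["fallback", "plugin working"],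
    ["config", "setting", "manifest", "package.json", "requirements", ".env"],
    ["project tree", "repo structure", "layout", "folders", "directories"],
    ["edit", "change", "update", "modify", "rewrite", "refactor", "fix"],
    ["error", "exception", "traceback", "failure", "broken"],
    ["explain", "why", "architecture", "overview"] ]

def rcLabels : List String :=
  [ "runtime_diagnostics", "config_manifest_lookup", "repo_navigation",
    "simple_edit_intent", "log_error_triage", "explain_style", "other" ]

def rcIntentPriority : PySem.Dict String Int :=
  PySem.Dict.ofList [("runtime_diagnostics", 0), ("code_edit", 3), ("bug_hunt", 4)]

def request_class_py_alt (goal : String) (intent : Option String) : String :=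
  let text := PySem.Str.lower goal
  if (PySem.Str.isIn "exact" text &&
      (["function", "class", "method", "body"].any (fun w => PySem.Str.isIn w text))) ||
     PySem.Str.isIn "exact-body" text then "exact_body"
  else
    let best0 := PySem.Dict.getD rcIntentPriority (PySem.Str.lower (intent.getD "")) 6
    let best := (PySem.List.enumerate rcRuleWords).foldl
      (fun best pw =>
        if pw.1 < best && pw.2.any (fun w => PySem.Str.isIn w text) then pw.1 else best)
      best0
    (PySem.List.pyGetD rcLabels best "other")  -- LABELS[best]; best is always a valid index 0..6

-- ===== PRECONDITION & SPEC =====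
def Spec_request_class_py (goal : String) (intent : Option String) (out : String) : Prop := out = request_class_py_alt goal intent
instance (goal : String) (intent : Option String) (out : String) : Decidable (Spec_request_class_py goal intent out) := by unfold Spec_request_class_py; infer_instance

-- ===== CLAIM (what is proved, stated in full; the proofs are below) =====
def Claim_equal_request_class_py : Prop := ∀ (goal : String) (intent : Option String), Dom_request_class_py goal intent → Spec_request_class_py goal intent (request_class_py goal intent)

-- ===== LEMMAS AND PROOFS =====

-- the if-chain and the min-priority scoring pass agree, for any intent string and any
-- values of the exact-body test (c1), the per-word tests fb/pw, and the per-category tests b1–b5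
set_option maxHeartbeats 4000000 in
theorem rcMain (it : String) (c1 fb pw b1 b2 b3 b4 b5 : Bool) :
    (if c1 then "exact_body"
     else if it == "runtime_diagnostics" || fb || pw then "runtime_diagnostics"
     else if b1 then "config_manifest_lookup"
     else if b2 then "repo_navigation"
     else if it == "code_edit" || b3 then "simple_edit_intent"
     else if it == "bug_hunt" || b4 then "log_error_triage"
     else if b5 then "explain_style"
     else "other")
    =
    (if c1 then "exact_body"
     else
       let best0 := PySem.Dict.getD rcIntentPriority it 6
       let best := (PySem.List.enumerate [fb || (pw || false), b1, b2, b3, b4, b5]).foldl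
         (fun best pb => if pb.1 < best && pb.2 then pb.1 else best) best0
       PySem.List.pyGetD rcLabels best "other") := by
  have h0 : (it == "runtime_diagnostics") = decide (it = "runtime_diagnostics") := by
    simp [BEq.beq]
  have h1 : (it == "code_edit") = decide (it = "code_edit") := by simp [BEq.beq]
  have h2 : (it == "bug_hunt") = decide (it = "bug_hunt") := by simp [BEq.beq]
  by_cases e0 : it = "runtime_diagnostics"
  · subst e0; cases c1 <;> cases fb <;> cases pw <;> cases b1 <;> cases b2 <;> cases b3 <;> cases b4 <;> cases b5 <;> rfl
  · by_cases e1 : it = "code_edit"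
    · subst e1; cases c1 <;> cases fb <;> cases pw <;> cases b1 <;> cases b2 <;> cases b3 <;> cases b4 <;> cases b5 <;> rfl
    · by_cases e2 : it = "bug_hunt"
      · subst e2; cases c1 <;> cases fb <;> cases pw <;> cases b1 <;> cases b2 <;> cases b3 <;> cases b4 <;> cases b5 <;> rfl
      · have f0 : ("runtime_diagnostics" == it) = false := by simp [Ne.symm e0]
        have f1 : ("code_edit" == it) = false := by simp [Ne.symm e1]
        have f2 : ("bug_hunt" == it) = false := by simp [Ne.symm e2]
        have d0 : PySem.Dict.getD rcIntentPriority it 6 = 6 := by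
          simp [PySem.Dict.getD, PySem.Dict.get?, rcIntentPriority, PySem.Dict.ofList,
                PySem.Dict.empty, PySem.Dict.insert, PySem.Dict.update, PySem.Dict.contains,
                List.foldl, List.find?, f0, f1, f2]
        rw [h0, h1, h2]
        simp only [e0, e1, e2, decide_false, Bool.false_or]
        rw [d0]
        cases c1 <;> cases fb <;> cases pw <;> cases b1 <;> cases b2 <;> cases b3 <;> cases b4 <;> cases b5 <;> rfl

-- ===== VERDICT (by name: the statement is the Claim_ definition above) =====
set_option maxHeartbeats 4000000 in
theorem request_class_py_spec : Claim_equal_request_class_py := by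
  intro goal intent _
  show request_class_py goal intent = request_class_py_alt goal intent
  exact rcMain (PySem.Str.lower (intent.getD ""))
    ((PySem.Str.isIn "exact" (PySem.Str.lower goal) &&
      (["function", "class", "method", "body"].any (fun w => PySem.Str.isIn w (PySem.Str.lower goal)))) ||
     PySem.Str.isIn "exact-body" (PySem.Str.lower goal))
    (PySem.Str.isIn "fallback" (PySem.Str.lower goal))
    (PySem.Str.isIn "plugin working" (PySem.Str.lower goal))
    (["config", "setting", "manifest", "package.json", "requirements", ".env"].any
      (fun w => PySem.Str.isIn w (PySem.Str.lower goal)))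
    (["project tree", "repo structure", "layout", "folders", "directories"].any
      (fun w => PySem.Str.isIn w (PySem.Str.lower goal)))
    (["edit", "change", "update", "modify", "rewrite", "refactor", "fix"].any
      (fun w => PySem.Str.isIn w (PySem.Str.lower goal)))
    (["error", "exception", "traceback", "failure", "broken"].any
      (fun w => PySem.Str.isIn w (PySem.Str.lower goal)))
    (["explain", "why", "architecture", "overview"].any
      (fun w => PySem.Str.isIn w (PySem.Str.lower goal)))
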